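-- pv_equiv track=rewrite | github.com/scraly/developers-conferences-agenda | tools/parser.py | parse_hyperlink
-- ===== SOURCE A (Python) =====
-- def parse_hyperlink(s):
-- 	counter = 0
-- 	final = ''
-- 	escapedState = False
--
-- 	# s[1:] to skip prefix '[' in Markdown
-- 	counter += 1
-- 	for ch in s[1:]:
-- 		counter += 1
-- 		if ch == '\\':
-- 			escapedState = True
-- 			continue
-- 		if escapedState:
-- 			final += ch
-- 		elif ch != ')':
-- 			final += ch
-- 		elif ch == ')':
-- 			# Done.
-- 			break
--
-- 	return final, s[counter:]
-- ===== SOURCE B (Python) =====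
-- def parse_hyperlink(s):
--     out = []
--     rest = s[1:]
--     while True:
--         bs = rest.find('\\')
--         cp = rest.find(')')
--         if bs != -1 and (cp == -1 or bs < cp):
--             out.append(rest[:bs])
--             out.append(rest[bs + 1:bs + 2])  # keep the escaped character
--             rest = rest[bs + 2:]
--         elif cp != -1:
--             return ''.join(out) + rest[:cp], rest[cp + 1:]
--         else:
--             return ''.join(out) + rest, ''
-- ===== Notes on version B (the rewrite author's own statement) =====
-- stated objective: alternative
-- what changed: Replaced A's char-by-char escapedState loop with a chunked find-then-slice loop that copies text up to the next backslash, keeps the escaped character, and otherwise splits at the first closing paren.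
-- intended difference: On strings whose tail has a backslash before the first ')' and additionally a doubled backslash or a later ')' not immediately preceded by a backslash, A's never-reset escape flag swallows the whole tail (returning every non-backslash character and remainder ''), while B treats a backslash as escaping exactly one character, so it keeps an escaped backslash and stops at the first unescaped ')' with the true remainder — the intended Markdown escape behaviour. — e.g. on parse_hyperlink("_\\))"): A returns ("))", ""), B returns (")", "")
import Mathlib
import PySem

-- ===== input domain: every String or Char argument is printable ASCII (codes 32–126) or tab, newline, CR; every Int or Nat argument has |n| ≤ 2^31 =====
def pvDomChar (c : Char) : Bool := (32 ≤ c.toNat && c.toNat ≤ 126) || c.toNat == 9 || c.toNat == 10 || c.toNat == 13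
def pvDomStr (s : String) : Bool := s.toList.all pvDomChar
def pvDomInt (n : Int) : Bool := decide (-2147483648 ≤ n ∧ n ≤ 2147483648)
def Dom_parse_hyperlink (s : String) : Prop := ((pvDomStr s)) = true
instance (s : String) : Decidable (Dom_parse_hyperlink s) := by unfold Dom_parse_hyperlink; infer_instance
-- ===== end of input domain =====

-- B parses the link target by repeated find-then-slice over backslash escapes instead of A's
-- per-character state machine; on escaped input A's never-reset escape flag makes it run off the
-- string, and B intentionally differs there (see D_parse_hyperlink).

-- ===== PORT A =====
-- the for-loop with break: state = (counter, final, escapedState); escapedState is never reset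
def parseALoop : List Char → Nat → List Char → Bool → List Char × Nat
  | [], counter, final, _ => (final, counter)
  | ch :: rest, counter, final, esc =>
    let counter := counter + 1
    if ch = '\\' then parseALoop rest counter final true
    else if esc then parseALoop rest counter (final ++ [ch]) esc
    else if ch ≠ ')' then parseALoop rest counter (final ++ [ch]) esc
    else (final, counter)

def parse_hyperlink (s : String) : String × String :=
  let cs := s.toList
  -- s[1:] = drop 1; counter starts at 0 and is immediately incremented to 1
  let r := parseALoop (cs.drop 1) 1 [] false
  -- s[counter:] with counter ≥ 0 is drop counter
  (String.ofList r.1, String.ofList (cs.drop r.2))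

-- ===== PORT B =====
-- the while-loop of Source B: rest shrinks past each backslash; all indices here are nonnegative,
-- so rest[:k] is take, rest[k:] is drop, rest[k:k+1] is (drop k).take 1
def parseBLoop (rest : List Char) (out : List Char) : List Char × List Char :=
  if h : PySem.Chars.find rest ['\\'] ≠ -1 ∧
      (PySem.Chars.find rest [')'] = -1 ∨ PySem.Chars.find rest ['\\'] < PySem.Chars.find rest [')']) then
    parseBLoop (rest.drop ((PySem.Chars.find rest ['\\']).toNat + 2))
      (out ++ rest.take (PySem.Chars.find rest ['\\']).toNat
           ++ (rest.drop ((PySem.Chars.find rest ['\\']).toNat + 1)).take 1)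
  else if PySem.Chars.find rest [')'] ≠ -1 then
    (out ++ rest.take (PySem.Chars.find rest [')']).toNat,
     rest.drop ((PySem.Chars.find rest [')']).toNat + 1))
  else
    (out ++ rest, [])
termination_by rest.length
decreasing_by
  have h0 : 0 ≤ PySem.Chars.find rest ['\\'] := by
    have := PySem.Chars.neg_one_le_find rest ['\\']
    omega
  have h2 : (['\\'] : List Char) <:+: rest := (PySem.Chars.find_nonneg_iff rest ['\\']).mp h0
  have h3 : 1 ≤ rest.length := by simpa using h2.length_le
  simp only [List.length_drop]
  omega

def parse_hyperlink_alt (s : String) : String × String :=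
  let r := parseBLoop (s.toList.drop 1) []
  (String.ofList r.1, String.ofList r.2)

-- ===== PRECONDITION & SPEC =====
-- On strings whose tail has a backslash before the first ')' and additionally a doubled backslash
-- or a later ')' not immediately preceded by a backslash, A's never-reset escape flag swallows the
-- whole tail (every non-backslash character, remainder ''), while B treats a backslash as escaping
-- exactly one character, so it keeps an escaped backslash and stops at the first unescaped ')'
-- with the true remainder — the intended Markdown escape behaviour.
def D_parse_hyperlink (s : String) : Prop :=
  let t := s.toList.drop 1
  let b := t.idxOf '\\'
  let u := t.drop b
  ')' ∉ t.take b ∧ (u.zip u.tail).any fun p => p.2 == if p.1 == '\\' then '\\' else ')' 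
instance (s : String) : Decidable (D_parse_hyperlink s) := by unfold D_parse_hyperlink; infer_instance

def Spec_parse_hyperlink (s : String) (out : String × String) : Prop :=
  ¬ D_parse_hyperlink s → out = parse_hyperlink_alt s
instance (s : String) (out : String × String) : Decidable (Spec_parse_hyperlink s out) := by
  unfold Spec_parse_hyperlink; infer_instance

def pvDiffWitness_parse_hyperlink : String := "_\\))"
def pvDiffWitnessOut_parse_hyperlink : (String × String) × (String × String) := (("))", ""), (")", ""))

-- ===== CLAIM (what is proved, stated in full; the proofs are below) =====
def Claim_unchanged_parse_hyperlink : Prop :=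
  ∀ (s : String), Dom_parse_hyperlink s → Spec_parse_hyperlink s (parse_hyperlink s)
def Claim_changed_parse_hyperlink : Prop :=
  Dom_parse_hyperlink (pvDiffWitness_parse_hyperlink) ∧
  D_parse_hyperlink (pvDiffWitness_parse_hyperlink) ∧
  parse_hyperlink (pvDiffWitness_parse_hyperlink) = pvDiffWitnessOut_parse_hyperlink.1 ∧
  parse_hyperlink_alt (pvDiffWitness_parse_hyperlink) = pvDiffWitnessOut_parse_hyperlink.2 ∧
  pvDiffWitnessOut_parse_hyperlink.1 ≠ pvDiffWitnessOut_parse_hyperlink.2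

-- ===== LEMMAS AND PROOFS =====

theorem singleton_prefix_drop (l : List Char) (c : Char) (k : Nat) :
    [c] <+: l.drop k ↔ l[k]? = some c := by
  rw [show ([c] <+: l.drop k ↔ (l.drop k).head? = some c) from ?_, List.head?_drop]
  cases l.drop k with
  | nil => simp
  | cons x xs => simp [List.cons_prefix_cons, eq_comm]

theorem find_singleton (l : List Char) (c : Char) :
    PySem.Chars.find l [c] =
      (match l.findIdx? (· == c) with | none => -1 | some i => (i : Int)) := by
  cases hf : l.findIdx? (· == c) with
  | none =>
    have hmem : c ∉ l := by
      intro hc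
      rcases List.findIdx?_eq_none_iff.mp hf c hc with h
      simp at h
    simp [PySem.Chars.find_eq_neg_one_iff, List.singleton_infix_iff, hmem]
  | some i =>
    have hmem : c ∈ l := by
      rcases List.findIdx?_eq_some_iff_getElem.mp hf with ⟨h1, h2, _⟩
      simp at h2
      exact h2 ▸ List.getElem_mem h1
    have h0 : 0 ≤ PySem.Chars.find l [c] := by
      rw [PySem.Chars.find_nonneg_iff, List.singleton_infix_iff]; exact hmem
    rcases PySem.Chars.find_spec h0 with ⟨hpre, hmin⟩
    rcases List.findIdx?_eq_some_iff_getElem.mp hf with ⟨hi, hgi, hmin'⟩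
    have hgi' : l[i] = c := by simpa using hgi
    have hj : l[(PySem.Chars.find l [c]).toNat]? = some c :=
      (singleton_prefix_drop _ _ _).mp hpre
    have : (PySem.Chars.find l [c]).toNat = i := by
      rcases lt_trichotomy (PySem.Chars.find l [c]).toNat i with h | h | h
      · exact absurd (by simpa using hmin' _ h) (by
          have hlt : (PySem.Chars.find l [c]).toNat < l.length := by
            by_contra hge
            simp [List.getElem?_eq_none (le_of_not_gt hge)] at hj
          simp [List.getElem?_eq_getElem hlt] at hj
          simp [hj])
      · exact h
      · exact absurd ((singleton_prefix_drop l c i).mpr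
          (by simp [List.getElem?_eq_getElem hi, hgi'])) (hmin _ h)
    show PySem.Chars.find l [c] = (i : Int)
    omega

theorem parseALoop_esc (l : List Char) : ∀ (c : Nat) (acc : List Char),
    parseALoop l c acc true = (acc ++ l.filter (· != '\\'), c + l.length) := by
  induction l with
  | nil => intro c acc; simp [parseALoop]
  | cons ch rest ih =>
    intro c acc
    by_cases h : ch = '\\'
    · simp [parseALoop, h, ih]; omega
    · simp [parseALoop, h, ih]
      omega

def targetB (l : List Char) (c : Nat) (acc : List Char) : List Char × Nat :=
  match l.findIdx? (· == ')'), l.findIdx? (· == '\\') with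
  | some cp, none => (acc ++ l.take cp, c + cp + 1)
  | some cp, some bs =>
    if cp < bs then (acc ++ l.take cp, c + cp + 1)
    else (acc ++ l.filter (· != '\\'), c + l.length)
  | none, _ => (acc ++ l.filter (· != '\\'), c + l.length)

theorem parseALoop_main (l : List Char) : ∀ (c : Nat) (acc : List Char),
    parseALoop l c acc false = targetB l c acc := by
  induction l with
  | nil => intro c acc; simp [parseALoop, targetB]
  | cons ch rest ih =>
    intro c acc
    by_cases hb : ch = '\\'
    · -- backslash first: escaped mode forever
      have h1 : (ch :: rest).findIdx? (· == '\\') = some 0 := by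
        simp [List.findIdx?_cons, hb]
      rw [show parseALoop (ch :: rest) c acc false
            = parseALoop rest (c + 1) acc true by simp [parseALoop, hb]]
      rw [parseALoop_esc]
      unfold targetB
      rw [h1]
      have hp : ¬ (ch == ')') = true := by simp [hb]
      cases hcp : rest.findIdx? (· == ')') with
      | none => simp [List.findIdx?_cons, hcp, hb]; omega
      | some i =>
        simp [List.findIdx?_cons, hcp, hb]
        omega
    · by_cases hp : ch = ')'
      · -- unescaped ')': break
        have h1 : (ch :: rest).findIdx? (· == ')') = some 0 := by
          simp [List.findIdx?_cons, hp]
        rw [show parseALoop (ch :: rest) c acc false = (acc, c + 1) by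
              simp [parseALoop, hp]]
        unfold targetB
        rw [h1]
        cases hbs : (ch :: rest).findIdx? (· == '\\') with
        | none => simp
        | some j =>
          have : j ≠ 0 := by
            intro h
            rcases List.findIdx?_eq_some_iff_getElem.mp hbs with ⟨_, hg, _⟩
            subst h; simp [hp] at hg
          simp [Nat.pos_of_ne_zero this]
      · -- ordinary char: appended, recurse
        rw [show parseALoop (ch :: rest) c acc false
              = parseALoop rest (c + 1) (acc ++ [ch]) false by
              simp [parseALoop, hb, hp]]
        rw [ih]
        unfold targetB
        have hbp : ¬ (ch == ')') = true := by simp [hp]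
        have hbb : ¬ (ch == '\\') = true := by simp [hb]
        cases hcp : rest.findIdx? (· == ')') with
        | none =>
          cases hbs : rest.findIdx? (· == '\\') with
          | none => simp [List.findIdx?_cons, hbp, hbb, hcp, hbs, hb]; omega
          | some j => simp [List.findIdx?_cons, hbp, hbb, hcp, hbs, hb]; omega
        | some i =>
          cases hbs : rest.findIdx? (· == '\\') with
          | none => simp [List.findIdx?_cons, hbp, hbb, hcp, hbs, List.take_succ_cons]; omega
          | some j =>
            simp only [List.findIdx?_cons, hbp, hbb, hcp, hbs, Option.map_some,
              Bool.false_eq_true, if_false]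
            by_cases hij : i < j
            · rw [if_pos (show i + 1 < j + 1 by omega), if_pos hij]
              simp [List.take_succ_cons]; omega
            · rw [if_neg (show ¬ i + 1 < j + 1 by omega), if_neg hij]
              simp [hb]; omega

-- ===== B-side lemmas =====

theorem getD_at (u : List Char) (j : Nat) (h : j < u.length) : u.getD j ' ' = u[j] := by
  simp [List.getD_eq_getElem?_getD, List.getElem?_eq_getElem h]

theorem getD_drop (u : List Char) (m j : Nat) (h : m + j < u.length) :
    (u.drop m).getD j ' ' = u.getD (m + j) ' ' := by
  rw [getD_at _ _ h, getD_at _ _ (by simp only [List.length_drop]; omega)]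
  simp [List.getElem_drop]

theorem notin_take {t : List Char} {b : Nat} (hmin : ∀ j, j < t.length → j < b → t.getD j ' ' ≠ ')') :
    ')' ∉ t.take b := by
  intro hmem
  obtain ⟨j, hj, hje⟩ := List.mem_iff_getElem.mp hmem
  have hj1 : j < b := by have := hj; simp [List.length_take] at this; omega
  have hj2 : j < t.length := by have := hj; simp [List.length_take] at this; omega
  exact hmin j hj2 hj1 (by rw [getD_at _ _ hj2]; simpa [List.getElem_take] using hje)

theorem zip_pair {u : List Char} {i : Nat} (h : i + 1 < u.length) :
    (u[i]'(by omega), u[i + 1]'h) ∈ u.zip u.tail := by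
  have hl : i < (u.zip u.tail).length := by
    simp only [List.length_zip, List.length_tail]
    omega
  have hg : (u.zip u.tail)[i]'hl = (u[i]'(by omega), u[i + 1]'h) := by
    rw [List.getElem_zip, List.getElem_tail]
  exact hg ▸ List.getElem_mem hl

theorem pairmem' {t : List Char} {b j : Nat} (hbj : b ≤ j) (h2 : j + 1 < t.length) :
    (t[j]'(by omega), t[j + 1]'h2) ∈ (t.drop b).zip (t.drop b).tail := by
  have hi : (j - b) + 1 < (t.drop b).length := by simp only [List.length_drop]; omega
  have hz := zip_pair hi
  have e1 : b + (j - b) = j := by omega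
  have e2 : b + (j - b + 1) = j + 1 := by omega
  simpa [List.getElem_drop, e1, e2] using hz

theorem pairmem {t : List Char} {b j : Nat} (hbj : b ≤ j - 1) (h1 : 1 ≤ j) (h2 : j < t.length) :
    (t[j - 1]'(by omega), t[j]'h2) ∈ (t.drop b).zip (t.drop b).tail := by
  have hz := pairmem' (t := t) (b := b) (j := j - 1) hbj (by omega)
  simpa [show j - 1 + 1 = j from by omega] using hz

theorem fI_some {u : List Char} {c : Char} {b : Nat} (h : u.findIdx? (· == c) = some b) :
    b < u.length ∧ u.getD b ' ' = c ∧ ∀ j, j < b → u.getD j ' ' ≠ c := by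
  obtain ⟨hb, hp, hmin⟩ := List.findIdx?_eq_some_iff_getElem.mp h
  refine ⟨hb, by rw [getD_at _ _ hb]; simpa using hp, ?_⟩
  intro j hj
  rw [getD_at _ _ (lt_trans hj hb)]
  simpa using hmin j hj

theorem fI_none {u : List Char} {c : Char} (h : u.findIdx? (· == c) = none) :
    ∀ j, j < u.length → u.getD j ' ' ≠ c := by
  intro j hj
  rw [getD_at _ _ hj]
  simpa using List.findIdx?_eq_none_iff.mp h (u[j]) (List.getElem_mem hj)

-- unfolding of parseBLoop in findIdx? form
theorem parseBLoop_eq (rest out : List Char) :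
    parseBLoop rest out =
      (match rest.findIdx? (· == '\\'), rest.findIdx? (· == ')') with
       | some b, none =>
           parseBLoop (rest.drop (b + 2)) (out ++ rest.take b ++ (rest.drop (b + 1)).take 1)
       | some b, some c =>
           if b < c then
             parseBLoop (rest.drop (b + 2)) (out ++ rest.take b ++ (rest.drop (b + 1)).take 1)
           else (out ++ rest.take c, rest.drop (c + 1))
       | none, some c => (out ++ rest.take c, rest.drop (c + 1))
       | none, none => (out ++ rest, [])) := by
  rw [parseBLoop]
  rw [find_singleton rest '\\', find_singleton rest ')']
  cases hbs : rest.findIdx? (· == '\\') with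
  | none =>
    cases hcp : rest.findIdx? (· == ')') with
    | none => simp
    | some c => simp
  | some b =>
    cases hcp : rest.findIdx? (· == ')') with
    | none =>
      have hb' : ((b : Int)) ≠ -1 := by omega
      simp [hb']
    | some c =>
      have hb' : ((b : Int)) ≠ -1 := by omega
      have hc' : ((c : Int)) ≠ -1 := by omega
      by_cases hbc : b < c
      · have : ((b : Int)) < (c : Int) := by exact_mod_cast hbc
        simp [hb', hc', hbc, this]
      · have : ¬ ((b : Int)) < (c : Int) := by exact_mod_cast hbc
        simp [hb', hc', hbc, this]

-- case-by-case equations for parseBLoop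
theorem pB_rec_none {u : List Char} {b : Nat} (hbs : u.findIdx? (· == '\\') = some b)
    (hcp : u.findIdx? (· == ')') = none) (out : List Char) :
    parseBLoop u out = parseBLoop (u.drop (b + 2)) (out ++ u.take b ++ (u.drop (b + 1)).take 1) := by
  rw [parseBLoop_eq, hbs, hcp]

theorem pB_rec_some {u : List Char} {b c : Nat} (hbs : u.findIdx? (· == '\\') = some b)
    (hcp : u.findIdx? (· == ')') = some c) (hbc : b < c) (out : List Char) :
    parseBLoop u out = parseBLoop (u.drop (b + 2)) (out ++ u.take b ++ (u.drop (b + 1)).take 1) := by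
  rw [parseBLoop_eq, hbs, hcp]
  simp [hbc]

theorem pB_break {u : List Char} {b c : Nat} (hbs : u.findIdx? (· == '\\') = some b)
    (hcp : u.findIdx? (· == ')') = some c) (hbc : ¬ b < c) (out : List Char) :
    parseBLoop u out = (out ++ u.take c, u.drop (c + 1)) := by
  rw [parseBLoop_eq, hbs, hcp]
  simp [hbc]

theorem pB_break' {u : List Char} {c : Nat} (hbs : u.findIdx? (· == '\\') = none)
    (hcp : u.findIdx? (· == ')') = some c) (out : List Char) :
    parseBLoop u out = (out ++ u.take c, u.drop (c + 1)) := by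
  rw [parseBLoop_eq, hbs, hcp]

theorem pB_all {u : List Char} (hbs : u.findIdx? (· == '\\') = none)
    (hcp : u.findIdx? (· == ')') = none) (out : List Char) :
    parseBLoop u out = (out ++ u, []) := by
  rw [parseBLoop_eq, hbs, hcp]

-- case-by-case equations for targetB
theorem tB_none {l : List Char} (hcp : l.findIdx? (· == ')') = none) (k : Nat) (acc : List Char) :
    targetB l k acc = (acc ++ l.filter (· != '\\'), k + l.length) := by
  unfold targetB
  rw [hcp]

theorem tB_sn {l : List Char} {cp : Nat} (hcp : l.findIdx? (· == ')') = some cp)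
    (hbs : l.findIdx? (· == '\\') = none) (k : Nat) (acc : List Char) :
    targetB l k acc = (acc ++ l.take cp, k + cp + 1) := by
  unfold targetB
  rw [hcp, hbs]

theorem tB_ss_lt {l : List Char} {cp bs : Nat} (hcp : l.findIdx? (· == ')') = some cp)
    (hbs : l.findIdx? (· == '\\') = some bs) (h : cp < bs) (k : Nat) (acc : List Char) :
    targetB l k acc = (acc ++ l.take cp, k + cp + 1) := by
  unfold targetB
  rw [hcp, hbs]
  simp [h]

theorem tB_ss_ge {l : List Char} {cp bs : Nat} (hcp : l.findIdx? (· == ')') = some cp)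
    (hbs : l.findIdx? (· == '\\') = some bs) (h : ¬ cp < bs) (k : Nat) (acc : List Char) :
    targetB l k acc = (acc ++ l.filter (· != '\\'), k + l.length) := by
  unfold targetB
  rw [hcp, hbs]
  simp [h]

-- proper-escape invariant: no doubled backslash, every ')' immediately preceded by '\'
def escOK (u : List Char) : Prop :=
  (∀ j, j + 1 < u.length → u.getD j ' ' = '\\' → u.getD (j + 1) ' ' ≠ '\\') ∧
  ∀ j, j < u.length → u.getD j ' ' = ')' → 1 ≤ j ∧ u.getD (j - 1) ' ' = '\\'

theorem take_no_bs {u : List Char} {b : Nat} (hmin : ∀ j, j < b → u.getD j ' ' ≠ '\\') :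
    ∀ a ∈ u.take b, (a != '\\') = true := by
  intro a ha
  obtain ⟨j, hj, rfl⟩ := List.mem_iff_getElem.mp ha
  have hj1 : j < b := by
    have := hj; simp [List.length_take] at this; omega
  have hj2 : j < u.length := by
    have := hj; simp [List.length_take] at this; omega
  have := hmin j hj1
  rw [getD_at _ _ hj2] at this
  simpa [List.getElem_take] using this

theorem esc_step {u : List Char} {b : Nat} (hb : b < u.length) (hgb : u.getD b ' ' = '\\')
    (hmin : ∀ j, j < b → u.getD j ' ' ≠ '\\') (hok : escOK u) :
    escOK (u.drop (b + 2)) ∧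
    u.filter (· != '\\') = u.take b ++ (u.drop (b + 1)).take 1 ++ (u.drop (b + 2)).filter (· != '\\') := by
  have hub : u[b] = '\\' := by rw [← getD_at u b hb]; exact hgb
  have hdropb : u.drop b = '\\' :: u.drop (b + 1) := by
    rw [List.drop_eq_getElem_cons hb, hub]
  have hf1' : ∀ j, j + 1 < (u.drop (b + 2)).length → (u.drop (b + 2)).getD j ' ' = '\\' →
      (u.drop (b + 2)).getD (j + 1) ' ' ≠ '\\' := by
    intro j hjl hx
    have hlend : j + 1 < u.length - (b + 2) := by simpa [List.length_drop] using hjl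
    rw [getD_drop u (b + 2) j (by omega)] at hx
    rw [getD_drop u (b + 2) (j + 1) (by omega)]
    have hh := hok.1 (b + 2 + j) (by omega) hx
    rw [show b + 2 + (j + 1) = b + 2 + j + 1 from by omega]
    exact hh
  have htk := take_no_bs hmin
  by_cases hlen : b + 1 < u.length
  · have hdropb1 : u.drop (b + 1) = u[b + 1] :: u.drop (b + 2) :=
      List.drop_eq_getElem_cons hlen
    have hc0 : u[b + 1] ≠ '\\' := by
      have hh := hok.1 b (by omega) hgb
      rw [getD_at _ _ hlen] at hh
      exact hh
    constructor
    · refine ⟨hf1', ?_⟩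
      intro j hj hgj
      have hjlen : b + 2 + j < u.length := by
        have := hj; simp [List.length_drop] at this; omega
      have hgj' : u.getD (b + 2 + j) ' ' = ')' := by
        rw [getD_at _ _ hjlen]
        rw [getD_at _ _ hj] at hgj
        simpa [List.getElem_drop] using hgj
      obtain ⟨-, h2⟩ := hok.2 (b + 2 + j) hjlen hgj'
      cases j with
      | zero =>
        exfalso
        apply hc0
        rw [← getD_at u (b + 1) hlen]
        simpa using h2
      | succ k =>
        refine ⟨by omega, ?_⟩
        have e0 : k + 1 - 1 = k := rfl
        rw [e0, getD_drop u (b + 2) k (by omega)]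
        have hkey : u.getD (b + 1 + (k + 1)) ' ' = '\\' := by
          have e : b + 2 + (k + 1) - 1 = b + 1 + (k + 1) := by omega
          rw [← e]; exact h2
        rw [show b + 2 + k = b + 1 + (k + 1) from by omega]
        exact hkey
    · have ht1 : (u.drop (b + 1)).take 1 = [u[b + 1]] := by rw [hdropb1]; rfl
      have hc0' : (u[b + 1] != '\\') = true := by simpa using hc0
      calc u.filter (· != '\\')
          = (u.take b ++ u.drop b).filter (· != '\\') := by rw [List.take_append_drop]
        _ = u.take b ++ (u[b + 1] :: (u.drop (b + 2)).filter (· != '\\')) := by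
              rw [List.filter_append, List.filter_eq_self.mpr htk, hdropb,
                  List.filter_cons_of_neg (by simp), hdropb1,
                  List.filter_cons_of_pos (p := fun x => x != '\\') hc0']
        _ = u.take b ++ (u.drop (b + 1)).take 1 ++ (u.drop (b + 2)).filter (· != '\\') := by
              rw [ht1]
              simp
  · have hd1 : u.drop (b + 1) = [] := List.drop_eq_nil_of_le (by omega)
    have hd2 : u.drop (b + 2) = [] := List.drop_eq_nil_of_le (by omega)
    constructor
    · exact ⟨by intro j hj; simp [hd2] at hj, by intro j hj; simp [hd2] at hj⟩
    · conv_lhs => rw [← List.take_append_drop b u, hdropb, hd1]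
      simp [List.filter_append, List.filter_eq_self.mpr htk, hd1, hd2]

theorem parseBLoop_esc : ∀ (n : Nat) (u : List Char), u.length ≤ n → escOK u →
    ∀ out, parseBLoop u out = (out ++ u.filter (· != '\\'), []) := by
  intro n
  induction n with
  | zero =>
    intro u hu hok out
    have : u = [] := List.eq_nil_of_length_eq_zero (by omega)
    subst this
    rw [pB_all (by simp) (by simp)]
    simp
  | succ n ih =>
    intro u hu hok out
    cases hbs : u.findIdx? (· == '\\') with
    | none =>
      have hnb := fI_none hbs
      have hcp : u.findIdx? (· == ')') = none := by
        cases hcp : u.findIdx? (· == ')') with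
        | none => rfl
        | some c =>
          obtain ⟨hc, hgc, -⟩ := fI_some hcp
          obtain ⟨h1, h2⟩ := hok.2 c hc hgc
          exact absurd h2 (hnb (c - 1) (by omega))
      have hfe : u.filter (· != '\\') = u := by
        apply List.filter_eq_self.mpr
        intro a ha
        obtain ⟨j, hj, rfl⟩ := List.mem_iff_getElem.mp ha
        have := hnb j hj
        rw [getD_at _ _ hj] at this
        simpa using this
      rw [pB_all hbs hcp, hfe]
    | some b =>
      obtain ⟨hb, hgb, hmin⟩ := fI_some hbs
      obtain ⟨hok', hfilt⟩ := esc_step hb hgb hmin hok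
      have hrec := ih (u.drop (b + 2)) (by simp only [List.length_drop]; omega) hok'
        (out ++ u.take b ++ (u.drop (b + 1)).take 1)
      have key : parseBLoop (u.drop (b + 2)) (out ++ u.take b ++ (u.drop (b + 1)).take 1)
          = (out ++ u.filter (· != '\\'), []) := by
        rw [hrec, hfilt]
        simp [List.append_assoc]
      cases hcp : u.findIdx? (· == ')') with
      | none => rw [pB_rec_none hbs hcp, key]
      | some c =>
        obtain ⟨hc, hgc, hminc⟩ := fI_some hcp
        have hbc : b < c := by
          rcases Nat.lt_trichotomy b c with h | h | h
          · exact h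
          · exact absurd ((h ▸ hgb).symm.trans hgc) (by decide)
          · exact absurd ((hok.2 c hc hgc).2) (hmin (c - 1) (by omega))
        rw [pB_rec_some hbs hcp hbc, key]

theorem unchanged_core (s : String) (hD : ¬ D_parse_hyperlink s) :
    parse_hyperlink s = parse_hyperlink_alt s := by
  simp only [D_parse_hyperlink] at hD
  simp only [parse_hyperlink, parse_hyperlink_alt]
  rw [parseALoop_main]
  have hdd : ∀ c : Nat, (s.toList.drop 1).drop (c + 1) = s.toList.drop (1 + c + 1) := by
    intro c
    rw [List.drop_drop]
    try congr 1
    try omega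
  have hdnil : s.toList.drop (1 + (s.toList.drop 1).length) = [] :=
    List.drop_eq_nil_of_le (by simp only [List.length_drop]; omega)
  cases hcp : (s.toList.drop 1).findIdx? (· == ')') with
  | none =>
    cases hbs : (s.toList.drop 1).findIdx? (· == '\\') with
    | none =>
      have hfe : (s.toList.drop 1).filter (· != '\\') = s.toList.drop 1 := by
        apply List.filter_eq_self.mpr
        intro a ha
        obtain ⟨j, hj, rfl⟩ := List.mem_iff_getElem.mp ha
        have := fI_none hbs j hj
        rw [getD_at _ _ hj] at this
        simpa using this
      rw [tB_none hcp, pB_all hbs hcp, hfe, hdnil]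
    | some b =>
      obtain ⟨hb, hgb, hmin⟩ := fI_some hbs
      have hfidxI : (s.toList.drop 1).idxOf '\\' = b := by
        rw [show (s.toList.drop 1).idxOf '\\' = (s.toList.drop 1).findIdx (· == '\\') from rfl,
            List.findIdx_eq_getD_findIdx?, hbs]
        rfl
      have hnp : ')' ∉ (s.toList.drop 1).take ((s.toList.drop 1).idxOf '\\') := by
        rw [hfidxI]
        exact notin_take (fun j hjl _ => fI_none hcp j hjl)
      have hesc : escOK (s.toList.drop 1) := by
        refine ⟨?_, ?_⟩
        · intro j hjl hx hy
          have hbj : b ≤ j := by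
            by_contra hlt
            exact hmin j (by omega) hx
          have hx' : (s.toList.drop 1)[j] = '\\' := by
            rw [← getD_at _ _ (by omega)]; exact hx
          have hy' : (s.toList.drop 1)[j + 1] = '\\' := by
            rw [← getD_at _ _ hjl]; exact hy
          apply hD
          refine ⟨hnp, ?_⟩
          rw [hfidxI]
          refine List.any_eq_true.mpr ⟨_, pairmem' hbj hjl, ?_⟩
          simp only [hx', hy']
          decide
        · intro j hj hgj
          exact absurd hgj (fI_none hcp j hj)
      rw [tB_none hcp, parseBLoop_esc ((s.toList.drop 1).length) _ le_rfl hesc, hdnil]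
  | some c =>
    obtain ⟨hc, hgc, hminc⟩ := fI_some hcp
    cases hbs : (s.toList.drop 1).findIdx? (· == '\\') with
    | none =>
      rw [tB_sn hcp hbs, pB_break' hbs hcp, hdd c]
    | some b =>
      obtain ⟨hb, hgb, hmin⟩ := fI_some hbs
      by_cases hcb : c < b
      · rw [tB_ss_lt hcp hbs hcb, pB_break hbs hcp (by omega), hdd c]
      · have hbc : b < c := by
          rcases Nat.lt_trichotomy b c with h | h | h
          · exact h
          · exact absurd ((h ▸ hgb).symm.trans hgc) (by decide)
          · omega
        have hfidxI : (s.toList.drop 1).idxOf '\\' = b := by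
          rw [show (s.toList.drop 1).idxOf '\\' = (s.toList.drop 1).findIdx (· == '\\') from rfl,
              List.findIdx_eq_getD_findIdx?, hbs]
          rfl
        have hnp : ')' ∉ (s.toList.drop 1).take ((s.toList.drop 1).idxOf '\\') := by
          rw [hfidxI]
          exact notin_take (fun j _ hjb => hminc j (by omega))
        have hesc : escOK (s.toList.drop 1) := by
          refine ⟨?_, ?_⟩
          · intro j hjl hx hy
            have hbj : b ≤ j := by
              by_contra hlt
              exact hmin j (by omega) hx
            have hx' : (s.toList.drop 1)[j] = '\\' := by
              rw [← getD_at _ _ (by omega)]; exact hx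
            have hy' : (s.toList.drop 1)[j + 1] = '\\' := by
              rw [← getD_at _ _ hjl]; exact hy
            apply hD
            refine ⟨hnp, ?_⟩
            rw [hfidxI]
            refine List.any_eq_true.mpr ⟨_, pairmem' hbj hjl, ?_⟩
            simp only [hx', hy']
            decide
          · intro j hj hgj
            have hjb : b < j := by
              rcases Nat.lt_trichotomy j b with h | h | h
              · exact absurd hgj (hminc j (by omega))
              · exact absurd ((h ▸ hgj).symm.trans hgb).symm (by decide)
              · exact h
            refine ⟨by omega, ?_⟩
            by_contra hne
            have hgj' : (s.toList.drop 1)[j] = ')' := by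
              rw [← getD_at _ _ hj]; exact hgj
            have hne' : (s.toList.drop 1)[j - 1] ≠ '\\' := by
              rw [← getD_at _ _ (by omega : j - 1 < (s.toList.drop 1).length)]; exact hne
            apply hD
            refine ⟨hnp, ?_⟩
            rw [hfidxI]
            have hf : ((s.toList.drop 1)[j - 1]'(by omega) == '\\') = false :=
              beq_eq_false_iff_ne.mpr hne'
            refine List.any_eq_true.mpr ⟨_, pairmem (by omega) (by omega) hj, ?_⟩
            simp only [hgj', hf]
            decide
        rw [tB_ss_ge hcp hbs (by omega), parseBLoop_esc ((s.toList.drop 1).length) _ le_rfl hesc, hdnil]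

theorem alt_witness : parse_hyperlink_alt "_\\))" = (")", "") := by
  have e1 : ("_\\))" : String).toList.drop 1 = ['\\', ')', ')'] := by decide
  have hb1 : (['\\', ')', ')'] : List Char).findIdx? (· == '\\') = some 0 := by decide
  have hc1 : (['\\', ')', ')'] : List Char).findIdx? (· == ')') = some 1 := by decide
  have hb2 : ([')'] : List Char).findIdx? (· == '\\') = none := by decide
  have hc2 : ([')'] : List Char).findIdx? (· == ')') = some 0 := by decide
  have h2 : parseBLoop ['\\', ')', ')'] [] = ([')'], []) := by
    rw [pB_rec_some hb1 hc1 (by omega)]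
    show parseBLoop [')'] [')'] = ([')'], [])
    rw [pB_break' hb2 hc2]
    decide
  simp only [parse_hyperlink_alt, e1, h2]
  try rfl

-- ===== VERDICT (by name: the statements are the Claim_ definitions above) =====
theorem parse_hyperlink_spec : Claim_unchanged_parse_hyperlink := by
  intro s _ hD
  exact (unchanged_core s hD).symm ▸ rfl

theorem parse_hyperlink_changed : Claim_changed_parse_hyperlink := by
  unfold Claim_changed_parse_hyperlink
  refine ⟨by decide, by decide, by decide, alt_witness, by decide⟩
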